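-- pv_equiv track=rewrite | github.com/NachoChef/laughing-garbanzo | projecteuler.py | arithDer
-- ===== SOURCE A (Python) =====
-- def  arithDer(lst:list):
--     quot = 1
--     sum = 0
--     for i in range(len(lst)):
--         lst2 = (lst[j] for j in range(len(lst)) if j is not i)
--         for j in lst2:
--             quot *= j
--         sum += quot
--         quot = 1
--     return sum
-- ===== SOURCE B (Python) =====
-- def arithDer(lst: list):
--     # One backward pass: keep (total, prod) where, for the suffix seen so far,
--     # total = sum of leave-one-out products and prod = product of all its elements.
--     total = 0
--     prod = 1
--     for x in reversed(lst):
--         total = prod + x * total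
--         prod = x * prod
--     return total
-- ===== Notes on version B (the rewrite author's own statement) =====
-- stated objective: alternative
-- what changed: Replaced the quadratic per-index re-multiplication with a single backward pass maintaining the running suffix product and the leave-one-out sum (O(n) multiplications instead of O(n^2); a timing run could not certify speed because its largest inputs are outside Pre_). Pre_ excludes lists longer than 257 elements, where A's `j is not i` index test silently stops excluding the i-th element (CPython interns only ints up to 256), an interpreter artefact.
import Mathlib
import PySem

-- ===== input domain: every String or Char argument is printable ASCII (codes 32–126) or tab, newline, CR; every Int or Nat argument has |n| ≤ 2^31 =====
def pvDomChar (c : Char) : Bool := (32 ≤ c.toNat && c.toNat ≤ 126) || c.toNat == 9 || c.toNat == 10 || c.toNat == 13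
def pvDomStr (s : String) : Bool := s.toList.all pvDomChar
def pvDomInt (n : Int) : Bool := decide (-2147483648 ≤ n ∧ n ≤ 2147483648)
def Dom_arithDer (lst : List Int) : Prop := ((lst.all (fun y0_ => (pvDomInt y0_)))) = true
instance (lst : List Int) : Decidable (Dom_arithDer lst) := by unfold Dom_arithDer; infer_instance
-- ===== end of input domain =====

-- B replaces A's per-index re-multiplication by one backward pass keeping
-- (leave-one-out sum, suffix product): n multiplicative steps instead of one pass per index.

-- ===== PORT A =====
-- Literal port of A.  Note: on the admitted inputs (Pre_: length ≤ 257) the Python test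
-- `j is not i` on the range indices is exactly `j ≠ i` (CPython caches ints 0..256);
-- the indices j are always in range, so pyGetD's default is never used.
def arithDer (lst : List Int) : Int :=
  (((PySem.List.pyRange 0 (lst.length : Int) 1).foldl (fun (st : Int × Int) i =>
      let lst2 := ((PySem.List.pyRange 0 (lst.length : Int) 1).filter (fun j => j ≠ i)).map
        (fun j => PySem.List.pyGetD lst j 0)
      let quot := lst2.foldl (fun q x => q * x) st.1
      (1, st.2 + quot))
    ((1 : Int), (0 : Int)))).2

-- ===== PORT B =====
-- One backward pass (Python: for x in reversed(lst) ⇒ foldr), state (total, prod):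
-- total = leave-one-out sum of the suffix seen so far, prod = its full product.
def arithDer_alt (lst : List Int) : Int :=
  (lst.foldr (fun x tp => (tp.2 + x * tp.1, x * tp.2)) ((0 : Int), (1 : Int))).1

-- ===== PRECONDITION & SPEC =====
-- Pre_ excludes lists longer than 257 elements: there A's `j is not i` identity test on the
-- int indices stops detecting equal indices (CPython interns only ints up to 256), so A's
-- returned value is an interpreter-cache artefact (the i-th element is included in its own
-- product) that no portable implementation can be specified to match.
def Pre_arithDer (lst : List Int) : Prop := lst.length ≤ 257
instance (lst : List Int) : Decidable (Pre_arithDer lst) := by unfold Pre_arithDer; infer_instance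
def pvWitness_arithDer : List Int := [2, 3, 4]
def Spec_arithDer (lst : List Int) (out : Int) : Prop := out = arithDer_alt lst
instance (lst : List Int) (out : Int) : Decidable (Spec_arithDer lst out) := by unfold Spec_arithDer; infer_instance

-- ===== CLAIM (what is proved, stated in full; the proofs are below) =====
def Claim_equal_arithDer : Prop := ∀ (lst : List Int), Dom_arithDer lst → Pre_arithDer lst → Spec_arithDer lst (arithDer lst)

-- ===== LEMMAS AND PROOFS =====

-- The clean mathematical value both ports compute: sum over k of the product of all
-- entries except the k-th.
def looSum (xs : List Int) : Int :=
  ((List.range xs.length).map (fun k =>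
    (((List.range xs.length).filter (fun j => j ≠ k)).map (fun j => xs.getD j 0)).prod)).sum

-- B-side: the second component of B's fold is the full product.
theorem alt_snd (xs : List Int) :
    (xs.foldr (fun x tp => (tp.2 + x * tp.1, x * tp.2)) ((0 : Int), (1 : Int))).2 = xs.prod := by
  induction xs with
  | nil => simp
  | cons x xs ih => simp [List.foldr, ih]

theorem alt_cons (x : Int) (xs : List Int) :
    arithDer_alt (x :: xs) = xs.prod + x * arithDer_alt xs := by
  simp [arithDer_alt, List.foldr, alt_snd]

-- looSum satisfies the same recursion.
theorem looSum_nil : looSum [] = 0 := by simp [looSum]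

theorem map_getD_range (xs : List Int) :
    (List.range xs.length).map (fun j => xs.getD j 0) = xs := by
  induction xs with
  | nil => simp
  | cons x xs ih =>
    simp only [List.getD_eq_getElem?_getD] at ih
    simp [List.range_succ_eq_map, List.map_map, Function.comp_def, ih]

theorem looSum_cons (x : Int) (xs : List Int) :
    looSum (x :: xs) = xs.prod + x * looSum xs := by
  unfold looSum
  have h0 : ∀ k : Nat, (!decide (0 = k.succ)) = true := by intro k; simp
  simp only [List.length_cons, List.range_succ_eq_map, List.map_cons, List.sum_cons,
    List.filter_cons, List.filter_map, List.map_map, Function.comp_def, ne_eq, decide_not,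
    Nat.succ_ne_zero, decide_true, Bool.not_true, Bool.false_eq_true, if_false, h0, if_true,
    Nat.succ.injEq, List.getD_cons_zero, List.getD_cons_succ, List.prod_cons]
  simp only [decide_false, Bool.not_false, List.filter_true]
  rw [map_getD_range, List.sum_map_mul_left]

theorem alt_eq_looSum (xs : List Int) : arithDer_alt xs = looSum xs := by
  induction xs with
  | nil => simp [arithDer_alt, looSum_nil]
  | cons x xs ih => rw [alt_cons, looSum_cons, ih]

-- A-side: the outer fold resets quot to 1 each step, so it accumulates a sum of inner folds.
theorem a_outer (inner : Int → Int → Int) (L : List Int) (s : Int) :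
    (L.foldl (fun (st : Int × Int) i => (1, st.2 + inner st.1 i)) (1, s)).2
      = s + (L.map (fun i => inner 1 i)).sum := by
  induction L generalizing s with
  | nil => simp
  | cons i L ih => simp [List.foldl, ih, add_assoc]

theorem a_eq_looSum (lst : List Int) : arithDer lst = looSum lst := by
  show (List.foldl _ ((1 : Int), (0 : Int)) _).2 = _
  rw [a_outer (fun q i => (((PySem.List.pyRange 0 (lst.length : Int) 1).filter
        (fun j => j ≠ i)).map (fun j => PySem.List.pyGetD lst j 0)).foldl (fun q x => q * x) q)]
  simp only [zero_add, PySem.List.pyRange_zero_nat, List.filter_map, List.map_map,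
    Function.comp_def, PySem.List.pyGetD_natCast, ne_eq, Nat.cast_inj, ← List.prod_eq_foldl]
  simp [looSum, List.getD_eq_getElem?_getD]

-- ===== VERDICT (by name: the statement is the Claim_ definition above) =====
theorem arithDer_spec : Claim_equal_arithDer := by
  intro lst _ _
  unfold Spec_arithDer
  rw [a_eq_looSum, alt_eq_looSum]
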